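-- pv_equiv track=rewrite | github.com/JMGillum/melt-calculator | check_config.py | GetDepthAndLastItem
-- ===== SOURCE A (Python) =====
-- def GetDepthAndLastItem(text):
--     text_index = 0
--     index = 0
--     current_depth = 0
--     while index > -1:
--         current_depth += 1
--         index = text.find(":",index)
--         if index > -1:
--             index += 1
--             text_index = index
--     return (current_depth,text[text_index:])
-- ===== SOURCE B (Python) =====
-- def GetDepthAndLastItem(text):
--     depth = text.count(":") + 1
--     i = text.rfind(":")
--     return (depth, text[i + 1:])
-- ===== Notes on version B (the rewrite author's own statement) =====
-- stated objective: simpler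
-- what changed: Replaces the index-threading while loop over repeated find() calls with two independent library computations: depth = colon count plus one, and the tail sliced after the last colon found by rfind.
import Mathlib
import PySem

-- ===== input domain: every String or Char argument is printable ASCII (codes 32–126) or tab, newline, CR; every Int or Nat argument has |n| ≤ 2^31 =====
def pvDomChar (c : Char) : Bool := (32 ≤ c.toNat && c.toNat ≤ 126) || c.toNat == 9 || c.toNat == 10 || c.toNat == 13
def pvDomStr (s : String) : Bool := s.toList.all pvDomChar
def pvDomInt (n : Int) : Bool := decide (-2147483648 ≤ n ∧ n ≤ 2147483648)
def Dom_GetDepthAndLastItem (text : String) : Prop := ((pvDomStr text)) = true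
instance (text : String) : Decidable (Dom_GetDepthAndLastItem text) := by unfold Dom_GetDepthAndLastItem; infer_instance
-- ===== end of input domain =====

-- B computes depth and last item independently (colon count plus one, and the slice after the last colon via rfind)
-- instead of A's single index-threading while loop over repeated find() calls; objective: simpler.


-- ===== PORT A =====
-- A's while loop, transliterated with a fuel counter that merely makes it total
-- (fuel = length + 2 always suffices; the 0-fuel branch is unreachable).
def GetDepthAndLastItemLoop (text : String) : Nat → Int → Int → Int → Int × String
  | 0, text_index, _, current_depth => (current_depth, PySem.Str.slice text (some text_index) none)
  | fuel + 1, text_index, index, current_depth =>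
      if index > -1 then
        let current_depth := current_depth + 1
        let index := PySem.Str.findFrom text ":" index
        if index > -1 then
          GetDepthAndLastItemLoop text fuel (index + 1) (index + 1) current_depth
        else
          GetDepthAndLastItemLoop text fuel text_index index current_depth
      else (current_depth, PySem.Str.slice text (some text_index) none)

def GetDepthAndLastItem (text : String) : Int × String :=
  GetDepthAndLastItemLoop text (text.toList.length + 2) 0 0 0

-- ===== PORT B =====
def GetDepthAndLastItem_alt (text : String) : Int × String :=
  let depth : Int := (PySem.Str.count text ":" : Int) + 1
  let i := PySem.Str.rfind text ":"
  (depth, PySem.Str.slice text (some (i + 1)) none)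

-- ===== PRECONDITION & SPEC =====
def Spec_GetDepthAndLastItem (text : String) (out : Int × String) : Prop := out = GetDepthAndLastItem_alt text
instance (text : String) (out : Int × String) : Decidable (Spec_GetDepthAndLastItem text out) := by unfold Spec_GetDepthAndLastItem; infer_instance

-- ===== CLAIM (what is proved, stated in full; the proofs are below) =====
def Claim_equal_GetDepthAndLastItem : Prop := ∀ (text : String), Dom_GetDepthAndLastItem text → Spec_GetDepthAndLastItem text (GetDepthAndLastItem text)

-- ===== LEMMAS AND PROOFS =====


theorem countGo_single (c : Char) : ∀ (fuel : Nat) (l : List Char) (acc : Nat),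
    l.length ≤ fuel → PySem.Chars.count.go [c] fuel l acc = acc + l.count c := by
  intro fuel
  induction fuel with
  | zero => intro l acc h; simp at h; simp [h, PySem.Chars.count.go]
  | succ f ih =>
    intro l acc h
    cases l with
    | nil => simp [PySem.Chars.count.go]
    | cons x t =>
      simp only [PySem.Chars.count.go]
      by_cases hx : c = x
      · subst hx
        simp [List.isPrefixOf, ih t (acc+1) (by simp at h; omega)]
        omega
      · simp [List.isPrefixOf, Ne.symm hx, ih t acc (by simp at h; omega), hx]

theorem count_single (s : List Char) (c : Char) :
    PySem.Chars.count s [c] = s.count c := by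
  simp [PySem.Chars.count, countGo_single c s.length s 0 le_rfl]


theorem rfindGo_neg (s : List Char) (c : Char) (h : c ∉ s) :
    ∀ n, PySem.Chars.rfind.go s [c] n = -1 := by
  intro n
  induction n with
  | zero =>
    simp only [PySem.Chars.rfind.go]
    have : ¬ [c].isPrefixOf s = true := by
      intro hp
      exact h ((List.IsPrefix.subset (List.isPrefixOf_iff_prefix.mp hp)) (by simp))
    simp [this]
  | succ m ih =>
    simp only [PySem.Chars.rfind.go]
    have : ¬ [c].isPrefixOf (s.drop (m+1)) = true := by
      intro hp
      have := (List.IsPrefix.subset (List.isPrefixOf_iff_prefix.mp hp)) (by simp : c ∈ [c])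
      exact h (List.mem_of_mem_drop this)
    simp [this]
    exact ih

theorem rfindGo_last (s : List Char) (c : Char) (j : Nat)
    (hpre : [c].isPrefixOf (s.drop j)) (hno : c ∉ s.drop (j + 1)) :
    ∀ n, j ≤ n → PySem.Chars.rfind.go s [c] n = j := by
  intro n
  induction n with
  | zero =>
    intro hj
    interval_cases j
    simp only [PySem.Chars.rfind.go]
    simp at hpre
    simp [hpre]
  | succ m ih =>
    intro hj
    simp only [PySem.Chars.rfind.go]
    by_cases hje : j = m + 1
    · subst hje; simp at hpre ⊢; simp [hpre]
    · have hjm : j ≤ m := by omega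
      have : ¬ [c].isPrefixOf (s.drop (m+1)) = true := by
        intro hp
        have hc : c ∈ s.drop (m+1) := (List.IsPrefix.subset (List.isPrefixOf_iff_prefix.mp hp)) (by simp)
        have : s.drop (m+1) = (s.drop (j+1)).drop (m - j) := by
          rw [List.drop_drop]; congr 1; omega
        rw [this] at hc
        exact hno (List.mem_of_mem_drop hc)
      simp [this]
      exact ih hjm

theorem loopA_inv (text : String) : ∀ (fuel k : Nat) (ti d : Int),
    k ≤ text.toList.length → text.toList.length + 2 - k ≤ fuel →
    GetDepthAndLastItemLoop text fuel ti (k : Int) d =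
      (d + 1 + ((text.toList.drop k).count ':' : Int),
       if ':' ∈ text.toList.drop k then
         PySem.Str.slice text (some (PySem.Str.rfind text ":" + 1)) none
       else PySem.Str.slice text (some ti) none) := by
  intro fuel
  induction fuel with
  | zero => intro k ti d hk hf; omega
  | succ f ih =>
    intro k ti d hk hf
    simp only [GetDepthAndLastItemLoop]
    rw [if_pos (by omega : (k : Int) > -1)]
    have hff : PySem.Str.findFrom text ":" (k : Int) none =
        if PySem.Chars.find (text.toList.drop k) [':'] = -1 then -1
        else (k : Int) + PySem.Chars.find (text.toList.drop k) [':'] := by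
      rw [PySem.Str.findFrom_eq]
      exact PySem.Chars.findFrom_natCast text.toList [':'] k hk
    by_cases hr : PySem.Chars.find (text.toList.drop k) [':'] = -1
    · -- no colon in the suffix
      have hnomem : ':' ∉ text.toList.drop k := by
        have := (PySem.Chars.find_eq_neg_one_iff (text.toList.drop k) [':']).mp hr
        intro hm; exact this ((List.singleton_infix_iff ':' _).mpr hm)
      rw [hff, if_pos hr, if_neg (by omega : ¬ ((-1 : Int) > -1))]
      obtain ⟨f', rfl⟩ : ∃ f', f = f' + 1 := ⟨f - 1, by omega⟩
      simp only [GetDepthAndLastItemLoop]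
      rw [if_neg (by omega : ¬ ((-1 : Int) > -1))]
      rw [if_neg hnomem, List.count_eq_zero_of_not_mem hnomem]
      simp
    · -- first colon in the suffix at relative position ρ
      have hr0 : 0 ≤ PySem.Chars.find (text.toList.drop k) [':'] := by
        have := PySem.Chars.neg_one_le_find (text.toList.drop k) [':']
        omega
      obtain ⟨hpre, hmin⟩ := PySem.Chars.find_spec hr0
      set ρ := (PySem.Chars.find (text.toList.drop k) [':']).toNat with hρ
      have hcast : PySem.Chars.find (text.toList.drop k) [':'] = (ρ : Int) := by omega
      have hdd : (text.toList.drop k).drop ρ = text.toList.drop (k + ρ) := by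
        rw [List.drop_drop]
      have hpre' : [':'] <+: text.toList.drop (k + ρ) := hdd ▸ hpre
      have hcons : text.toList.drop (k + ρ) = ':' :: text.toList.drop (k + ρ + 1) := by
        obtain ⟨rest, hrest⟩ := hpre'
        rw [← hrest]
        have h2 : (text.toList.drop (k + ρ)).tail = rest := by rw [← hrest]; rfl
        rw [← h2, List.tail_drop]; rfl
      have hjlt : k + ρ < text.toList.length := by
        by_contra hge
        have : text.toList.drop (k + ρ) = [] := List.drop_eq_nil_of_le (by omega)
        rw [this] at hcons; exact absurd hcons (by simp)
      -- no colon in positions k..k+ρ-1 of the suffix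
      have htake : ':' ∉ (text.toList.drop k).take ρ := by
        intro hm
        obtain ⟨i, hi, hgi⟩ := List.getElem_of_mem hm
        have hil : i < ρ := by
          have := hi; simp [List.length_take] at this; omega
        have hidrop : [':'] <+: (text.toList.drop k).drop i := by
          have hilen : i < (text.toList.drop k).length := by
            simp [List.length_take] at hi; simp; omega
          rw [List.drop_eq_getElem_cons hilen]
          refine ⟨(text.toList.drop k).drop (i+1), ?_⟩
          simp [List.getElem_take] at hgi
          simp [hgi]
        exact hmin i hil hidrop
      have hcount : (text.toList.drop k).count ':' = 1 + (text.toList.drop (k + ρ + 1)).count ':' := by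
        conv_lhs => rw [← List.take_append_drop ρ (text.toList.drop k)]
        rw [List.count_append, List.count_eq_zero_of_not_mem htake, hdd, hcons]
        simp
        omega
      have hmem : ':' ∈ text.toList.drop k := by
        have : ':' ∈ text.toList.drop (k + ρ) := by rw [hcons]; simp
        rw [← hdd] at this
        exact List.mem_of_mem_drop this
      rw [hff, if_neg hr, hcast]
      rw [if_pos (by omega : (k : Int) + (ρ : Int) > -1)]
      have harg : (k : Int) + (ρ : Int) + 1 = ((k + ρ + 1 : Nat) : Int) := by push_cast; ring
      rw [harg]
      rw [ih (k + ρ + 1) _ (d + 1) (by omega) (by omega)]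
      rw [if_pos hmem, hcount]
      by_cases hmem2 : ':' ∈ text.toList.drop (k + ρ + 1)
      · rw [if_pos hmem2]
        rw [Prod.ext_iff]
        constructor
        · push_cast; ring
        · rfl
      · rw [if_neg hmem2]
        have hrf : PySem.Str.rfind text ":" = ((k + ρ : Nat) : Int) := by
          rw [PySem.Str.rfind_eq]
          show PySem.Chars.rfind text.toList [':'] = _
          unfold PySem.Chars.rfind
          exact rfindGo_last text.toList ':' (k + ρ)
            (List.isPrefixOf_iff_prefix.mpr hpre') hmem2 text.toList.length (by omega)
        rw [hrf]
        rw [Prod.ext_iff]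
        constructor
        · push_cast; ring
        · simp

-- ===== VERDICT (by name: the statement is the Claim_ definition above) =====
theorem GetDepthAndLastItem_spec : Claim_equal_GetDepthAndLastItem := by
  intro text _
  show GetDepthAndLastItem text = GetDepthAndLastItem_alt text
  unfold GetDepthAndLastItem GetDepthAndLastItem_alt
  have h := loopA_inv text (text.toList.length + 2) 0 0 0 (Nat.zero_le _) (by omega)
  push_cast at h
  rw [h]
  have hc : PySem.Str.count text ":" = text.toList.count ':' := by
    show PySem.Chars.count text.toList [':'] = _
    exact count_single text.toList ':'
  by_cases hmem : ':' ∈ text.toList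
  · rw [List.drop_zero, if_pos hmem, Prod.ext_iff]
    refine ⟨?_, rfl⟩
    rw [hc]; push_cast; ring
  · rw [List.drop_zero, if_neg hmem, Prod.ext_iff]
    have hrf : PySem.Str.rfind text ":" = -1 := by
      show PySem.Chars.rfind text.toList [':'] = -1
      exact rfindGo_neg text.toList ':' hmem text.toList.length
    constructor
    · rw [hc, List.count_eq_zero_of_not_mem hmem]; norm_num
    · rw [hrf]; norm_num
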